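-- pv_equiv track=rewrite | github.com/TravisWheelerLab/ULTRA-experiments | results/splitting_dist/make_split.py | units_eq
-- ===== SOURCE A (Python) =====
-- def units_eq(unit1, unit2):
-- 	for i in range(len(unit1)):
-- 		count=0.0
-- 		for j in range(len(unit2)):
-- 			c = (i + j) % len(unit2)
-- 			if unit1[j] == unit2[c]:
-- 				count +=1
-- 		if count / len(unit1) > 0.5:
-- 			return True
-- 	return False
-- ===== SOURCE B (Python) =====
-- def units_eq(unit1, unit2):
--     # Index-of-positions rescan-free variant: build a char -> positions index of unit2 once,
--     # accumulate per-shift match counts, then threshold.  Return value only; no mutation.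
--     n = len(unit1)
--     m = len(unit2)
--     if n == 0:
--         return False
--     positions = {}
--     for p, ch in enumerate(unit2):
--         positions.setdefault(ch, []).append(p)
--     counts = [0] * m
--     for j in range(m):
--         for p in positions.get(unit1[j], []):
--             counts[(p - j) % m] += 1
--     return any(2 * c > n for c in counts)
-- ===== Notes on version B (the rewrite author's own statement) =====
-- stated objective: faster
-- what changed: A rescans every position of unit2 for every shift; B builds a char-to-positions index of unit2 once, then for each position of unit1 bumps a per-shift match counter only at the index positions holding that character, and thresholds the counter array at the end.
import Mathlib
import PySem

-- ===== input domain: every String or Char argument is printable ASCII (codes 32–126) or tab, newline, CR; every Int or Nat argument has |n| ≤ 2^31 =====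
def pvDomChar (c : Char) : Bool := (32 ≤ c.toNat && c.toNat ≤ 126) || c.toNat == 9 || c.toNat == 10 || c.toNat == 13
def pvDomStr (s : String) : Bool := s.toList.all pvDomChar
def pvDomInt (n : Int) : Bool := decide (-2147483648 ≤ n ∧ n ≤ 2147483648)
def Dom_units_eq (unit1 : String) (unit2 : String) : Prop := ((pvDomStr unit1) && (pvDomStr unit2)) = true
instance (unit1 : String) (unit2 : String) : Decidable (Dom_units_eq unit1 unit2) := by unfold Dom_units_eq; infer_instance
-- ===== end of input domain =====

-- B replaces A's scan of every rotation position by a char→positions index of unit2 built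
-- once, accumulating per-shift match counts only at actually matching positions (objective:
-- faster by a constant factor on diverse alphabets; return value only, no mutation).

-- ===== PORT A =====
-- `count` is a Python float holding a small integer; `count / len(unit1) > 0.5` is exact
-- for these magnitudes and is ported as `2 * count > len(unit1)` over Int.
def units_eq (unit1 : String) (unit2 : String) : Bool :=
  let u1 := unit1.toList
  let u2 := unit2.toList
  (List.range u1.length).any (fun i =>
    let count : Int :=
      (List.range u2.length).foldl (fun count j =>
        let c : Nat := (i + j) % u2.length
        if PySem.List.pyGet? u1 (j : Int) = PySem.List.pyGet? u2 (c : Int)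
        then count + 1 else count) 0
    2 * count > (u1.length : Int))

-- ===== PORT B =====
-- `positions.setdefault(ch, []).append(p)` stores the extended list back at `ch`;
-- ported as insert of `getD ch [] ++ [p]` (same dict semantics).  Indices read/written
-- via pyGetD/pySetD are in range on every input B's Python returns on.
def units_eq_alt (unit1 : String) (unit2 : String) : Bool :=
  let u1 := unit1.toList
  let u2 := unit2.toList
  let n := u1.length
  let m := u2.length
  if n = 0 then false
  else
    let positions : PySem.Dict Char (List Int) :=
      (PySem.List.enumerate u2).foldl
        (fun d pc => d.insert pc.2 (d.getD pc.2 [] ++ [pc.1])) ∅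
    let counts : List Int :=
      (List.range m).foldl (fun cs (j : Nat) =>
        (positions.getD (PySem.List.pyGetD u1 (j : Int) ' ') []).foldl
          (fun cs p =>
            let idx := PySem.Int.mod (p - (j : Int)) (m : Int)
            PySem.List.pySetD cs idx (PySem.List.pyGetD cs idx 0 + 1)) cs)
        (List.replicate m 0)
    counts.any (fun c => 2 * c > (n : Int))

-- ===== PRECONDITION & SPEC =====
-- A raises IndexError (unit1[j] with j up to len(unit2)-1) exactly when unit1 is nonempty
-- and shorter than unit2; Pre_ excludes only those inputs.
def Pre_units_eq (unit1 : String) (unit2 : String) : Prop :=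
  unit1.toList.length = 0 ∨ unit2.toList.length ≤ unit1.toList.length
instance (unit1 : String) (unit2 : String) : Decidable (Pre_units_eq unit1 unit2) := by
  unfold Pre_units_eq; infer_instance

def pvWitness_units_eq : String × String := ("abcab", "abc")

def Spec_units_eq (unit1 : String) (unit2 : String) (out : Bool) : Prop := out = units_eq_alt unit1 unit2
instance (unit1 : String) (unit2 : String) (out : Bool) : Decidable (Spec_units_eq unit1 unit2 out) := by unfold Spec_units_eq; infer_instance

-- ===== CLAIM (what is proved, stated in full; the proofs are below) =====
def Claim_equal_units_eq : Prop := ∀ (unit1 : String) (unit2 : String), Dom_units_eq unit1 unit2 → Pre_units_eq unit1 unit2 → Spec_units_eq unit1 unit2 (units_eq unit1 unit2)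

-- ===== LEMMAS AND PROOFS =====

-- number of positions j at which unit1 matches the rotation of unit2 by s
def pvCnt (u1 u2 : List Char) (s : Nat) : Nat :=
  (List.range u2.length).countP (fun j => decide (u1[j]? = u2[(s + j) % u2.length]?))

lemma pvCnt_mod (u1 u2 : List Char) (i : Nat) :
    pvCnt u1 u2 i = pvCnt u1 u2 (i % u2.length) := by
  unfold pvCnt
  apply List.countP_congr
  intro j _
  have : (i + j) % u2.length = (i % u2.length + j) % u2.length := by
    conv_lhs => rw [Nat.add_mod]
    conv_rhs => rw [Nat.add_mod, Nat.mod_mod_of_dvd _ dvd_rfl]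
  rw [this]

lemma units_eq_as_any (unit1 unit2 : String) :
    units_eq unit1 unit2 =
      (List.range unit1.toList.length).any
        (fun i => decide (2 * (pvCnt unit1.toList unit2.toList i : Int) > (unit1.toList.length : Int))) := by
  unfold units_eq
  apply congrArg
  funext i
  have hb :
      (List.range unit2.toList.length).foldl (fun (count : Int) (j : Nat) =>
        if PySem.List.pyGet? unit1.toList (j : Int)
            = PySem.List.pyGet? unit2.toList (((i + j) % unit2.toList.length : Nat) : Int)
        then count + 1 else count) (0 : Int)
      = 0 + (pvCnt unit1.toList unit2.toList i : Int) := by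
    have hfun : (fun (count : Int) (j : Nat) =>
        if PySem.List.pyGet? unit1.toList (j : Int)
            = PySem.List.pyGet? unit2.toList (((i + j) % unit2.toList.length : Nat) : Int)
        then count + 1 else count)
      = (fun (acc : Int) (j : Nat) =>
        if (fun j : Nat => decide (unit1.toList[j]? = unit2.toList[(i + j) % unit2.toList.length]?)) j = true
        then acc + 1 else acc) := by
      funext count j
      rw [PySem.List.pyGet?_natCast, PySem.List.pyGet?_natCast]
      simp only [decide_eq_true_eq]
    rw [hfun, PySem.List.foldl_count_if]
    simp only [pvCnt]
  simp only [hb]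
  norm_num

-- the dict built by the positions loop: value at c = first components of the pairs with second = c
lemma dict_positions (l : List (Int × Char)) (d : PySem.Dict Char (List Int)) (c : Char) :
    (l.foldl (fun d pc => d.insert pc.2 (d.getD pc.2 [] ++ [pc.1])) d).getD c []
      = d.getD c [] ++ ((l.filter (fun pc => pc.2 == c)).map (·.1)) := by
  induction l generalizing d with
  | nil => simp
  | cons pc t ih =>
    simp only [List.foldl_cons, List.filter_cons, ih]
    by_cases h : pc.2 = c
    · simp [h]
    · simp [h, PySem.Dict.getD_insert, Ne.symm h]

-- one inner (positions) fold: bumps counts at (p - j) % m once per listed p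
lemma bump_fold (m j : Nat) (l : List Int) (cs : List Int) (hcs : cs.length = m)
    (s : Nat) (hs : s < m) :
    ((l.foldl (fun cs p =>
        PySem.List.pySetD cs (PySem.Int.mod (p - (j : Int)) (m : Int))
          (PySem.List.pyGetD cs (PySem.Int.mod (p - (j : Int)) (m : Int)) 0 + 1)) cs).length = m)
    ∧ PySem.List.pyGetD (l.foldl (fun cs p =>
        PySem.List.pySetD cs (PySem.Int.mod (p - (j : Int)) (m : Int))
          (PySem.List.pyGetD cs (PySem.Int.mod (p - (j : Int)) (m : Int)) 0 + 1)) cs) (s : Int) 0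
      = PySem.List.pyGetD cs (s : Int) 0
        + (l.countP (fun p => decide (PySem.Int.mod (p - (j : Int)) (m : Int) = (s : Int))) : Int) := by
  induction l generalizing cs with
  | nil => simpa using hcs
  | cons p t ih =>
    have hmnat : 0 < m := Nat.lt_of_le_of_lt (Nat.zero_le s) hs
    have hm : (0 : Int) < (m : Int) := by exact_mod_cast hmnat
    have h0 : 0 ≤ PySem.Int.mod (p - (j : Int)) (m : Int) := PySem.Int.mod_nonneg _ hm
    have h1 : PySem.Int.mod (p - (j : Int)) (m : Int) < (m : Int) := PySem.Int.mod_lt _ hm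
    have hk : PySem.Int.mod (p - (j : Int)) (m : Int)
        = (((PySem.Int.mod (p - (j : Int)) (m : Int)).toNat : Nat) : Int) := by omega
    have hklt : (PySem.Int.mod (p - (j : Int)) (m : Int)).toNat < cs.length := by omega
    obtain ⟨ihlen, ihget⟩ := ih
      (PySem.List.pySetD cs (PySem.Int.mod (p - (j : Int)) (m : Int))
        (PySem.List.pyGetD cs (PySem.Int.mod (p - (j : Int)) (m : Int)) 0 + 1))
      (by rw [PySem.List.length_pySetD]; exact hcs)
    refine ⟨by simpa using ihlen, ?_⟩
    simp only [List.foldl_cons]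
    rw [ihget, List.countP_cons]
    conv_lhs => rw [hk]
    rw [PySem.List.pyGetD_pySetD_natCast _ _ _ _ _ hklt]
    by_cases he : s = (PySem.Int.mod (p - (j : Int)) (m : Int)).toNat
    · have hmod : PySem.Int.mod (p - (j : Int)) (m : Int) = (s : Int) := by omega
      rw [if_pos he, ← he]
      have hdec : decide (PySem.Int.mod (p - (j : Int)) (m : Int) = (s : Int)) = true := by
        simp [hmod]
      rw [hdec]
      simp
      omega
    · have hmod : ¬ (PySem.Int.mod (p - (j : Int)) (m : Int) = (s : Int)) := by omega
      rw [if_neg he]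
      simp [hmod]

-- positions p < m with (p - j) % m = s are exactly p = (s + j) % m
lemma mod_rot_iff (p j s m : Nat) (hp : p < m) (hs : s < m) :
    PySem.Int.mod ((p : Int) - (j : Int)) (m : Int) = (s : Int) ↔ p = (s + j) % m := by
  have hm : (0 : Int) < (m : Int) := by exact_mod_cast Nat.lt_of_le_of_lt (Nat.zero_le s) hs
  rw [PySem.Int.mod_eq_emod_of_pos hm]
  constructor
  · intro h
    have h2 : ((s : Int) + (j : Int)) % (m : Int) = (p : Int) := by
      calc ((s : Int) + (j : Int)) % (m : Int)
          = (((p : Int) - (j : Int)) % (m : Int) + (j : Int)) % (m : Int) := by rw [h]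
        _ = (((p : Int) - (j : Int)) + (j : Int)) % (m : Int) := by rw [Int.emod_add_emod]
        _ = (p : Int) % (m : Int) := by ring_nf
        _ = (p : Int) := Int.emod_eq_of_lt (by positivity) (by exact_mod_cast hp)
    have : (((s + j) % m : Nat) : Int) = (p : Int) := by push_cast; exact h2
    exact_mod_cast this.symm
  · intro h
    subst h
    push_cast
    rw [Int.sub_emod, Int.emod_emod_of_dvd _ dvd_rfl, ← Int.sub_emod]
    have : (s : Int) + (j : Int) - (j : Int) = (s : Int) := by ring
    rw [this]
    exact Int.emod_eq_of_lt (by positivity) (by exact_mod_cast hs)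

-- counting a single element of a duplicate-free list, under an extra condition
lemma countP_single {α : Type} [DecidableEq α] (l : List α) (hnd : l.Nodup) (a : α)
    (ha : a ∈ l) (q : α → Bool) :
    l.countP (fun x => decide (x = a) && q x) = if q a then 1 else 0 := by
  induction l with
  | nil => cases ha
  | cons x t ih =>
    rw [List.countP_cons]
    rcases List.mem_cons.1 ha with h | h
    · subst h
      have hx : a ∉ t := (List.nodup_cons.1 hnd).1
      have ht0 : t.countP (fun y => decide (y = a) && q y) = 0 := by
        rw [List.countP_eq_zero]
        intro y hy hpy
        simp only [Bool.and_eq_true, decide_eq_true_eq] at hpy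
        exact hx (hpy.1 ▸ hy)
      rw [ht0]
      by_cases hq : q a = true <;> simp [hq]
    · have hx : x ≠ a := by rintro rfl; exact (List.nodup_cons.1 hnd).1 h
      rw [ih (List.nodup_cons.1 hnd).2 h]
      simp [hx]

-- the whole counts loop of B: value at shift s is the sum of the per-j inner counts
lemma counts_spec (d : PySem.Dict Char (List Int)) (u1 : List Char) (m : Nat)
    (js : List Nat) (cs : List Int) (hcs : cs.length = m) (s : Nat) (hs : s < m) :
    ((js.foldl (fun cs (j : Nat) =>
        (d.getD (PySem.List.pyGetD u1 (j : Int) ' ') []).foldl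
          (fun cs p =>
            let idx := PySem.Int.mod (p - (j : Int)) (m : Int)
            PySem.List.pySetD cs idx (PySem.List.pyGetD cs idx 0 + 1)) cs) cs).length = m)
    ∧ PySem.List.pyGetD (js.foldl (fun cs (j : Nat) =>
        (d.getD (PySem.List.pyGetD u1 (j : Int) ' ') []).foldl
          (fun cs p =>
            let idx := PySem.Int.mod (p - (j : Int)) (m : Int)
            PySem.List.pySetD cs idx (PySem.List.pyGetD cs idx 0 + 1)) cs) cs) (s : Int) 0
      = PySem.List.pyGetD cs (s : Int) 0
        + (js.map (fun (j : Nat) =>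
            ((d.getD (PySem.List.pyGetD u1 (j : Int) ' ') []).countP
              (fun p => decide (PySem.Int.mod (p - (j : Int)) (m : Int) = (s : Int))) : Int))).sum := by
  induction js generalizing cs with
  | nil => simpa using hcs
  | cons j t ih =>
    have hb := bump_fold m j (d.getD (PySem.List.pyGetD u1 (j : Int) ' ') []) cs hcs s hs
    obtain ⟨ih1, ih2⟩ := ih
      ((d.getD (PySem.List.pyGetD u1 (j : Int) ' ') []).foldl
        (fun cs p =>
          let idx := PySem.Int.mod (p - (j : Int)) (m : Int)
          PySem.List.pySetD cs idx (PySem.List.pyGetD cs idx 0 + 1)) cs) hb.1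
    refine ⟨by simpa using ih1, ?_⟩
    rw [List.foldl_cons]
    rw [ih2]
    have hb2 := hb.2
    rw [show ((d.getD (PySem.List.pyGetD u1 (j : Int) ' ') []).foldl
        (fun cs p =>
          let idx := PySem.Int.mod (p - (j : Int)) (m : Int)
          PySem.List.pySetD cs idx (PySem.List.pyGetD cs idx 0 + 1)) cs)
      = ((d.getD (PySem.List.pyGetD u1 (j : Int) ' ') []).foldl
        (fun cs p =>
          PySem.List.pySetD cs (PySem.Int.mod (p - (j : Int)) (m : Int))
            (PySem.List.pyGetD cs (PySem.Int.mod (p - (j : Int)) (m : Int)) 0 + 1)) cs) from rfl,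
      hb2]
    simp only [List.map_cons, List.sum_cons]
    ring

-- `l.any f` as a scan of the index range
lemma any_eq_range_any {α : Type} (l : List α) (d : α) (f : α → Bool) :
    l.any f = (List.range l.length).any (fun i => f (l.getD i d)) := by
  rw [Bool.eq_iff_iff, List.any_eq_true, List.any_eq_true]
  constructor
  · rintro ⟨x, hx, hfx⟩
    obtain ⟨i, hi, rfl⟩ := List.mem_iff_getElem.1 hx
    exact ⟨i, List.mem_range.2 hi, by rwa [List.getD_eq_getElem _ _ hi]⟩
  · rintro ⟨i, hi, hfi⟩
    have hi' := List.mem_range.1 hi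
    refine ⟨l[i], List.getElem_mem _, ?_⟩
    rwa [List.getD_eq_getElem _ _ hi'] at hfi

-- B, under Pre_, scans the m cyclic shifts
lemma units_eq_alt_as_any (unit1 unit2 : String)
    (hpre : unit2.toList.length ≤ unit1.toList.length) (hn : unit1.toList.length ≠ 0) :
    units_eq_alt unit1 unit2 =
      (List.range unit2.toList.length).any
        (fun s => decide (2 * (pvCnt unit1.toList unit2.toList s : Int) > (unit1.toList.length : Int))) := by
  by_cases hm0 : unit2.toList.length = 0
  · simp [units_eq_alt, hm0, pvCnt]
  have hm : 0 < unit2.toList.length := Nat.pos_of_ne_zero hm0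
  simp only [units_eq_alt, if_neg hn]
  set u1 := unit1.toList with hu1
  set u2 := unit2.toList with hu2
  set n := u1.length with hn'
  set m := u2.length with hm'
  set positions : PySem.Dict Char (List Int) :=
    (PySem.List.enumerate u2).foldl
      (fun d pc => d.insert pc.2 (d.getD pc.2 [] ++ [pc.1])) ∅ with hposdef
  -- the positions dict holds, per character, its (ascending) positions in u2
  have hpos : ∀ c : Char, positions.getD c [] =
      ((List.range m).filter (fun p => u2.getD p ' ' == c)).map (fun p : Nat => (p : Int)) := by
    intro c
    rw [hposdef, dict_positions,
      show (∅ : PySem.Dict Char (List Int)).getD c [] = [] from PySem.Dict.getD_empty c [],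
      List.nil_append]
    rw [PySem.List.enumerate_eq_map_pyRange u2 ' ', PySem.List.pyRange_one]
    simp [List.filter_map, List.map_map, Function.comp_def, PySem.List.pyGetD_natCast, List.getD]
    rw [hm']
  -- value of the counts array at each shift s
  have hcounts := fun (s : Nat) (hs : s < m) =>
    counts_spec positions u1 m (List.range m) (List.replicate m 0) (by simp) s hs
  have hval : ∀ s : Nat, s < m →
      ((List.range m).foldl (fun cs (j : Nat) =>
        (positions.getD (PySem.List.pyGetD u1 (j : Int) ' ') []).foldl
          (fun cs p =>
            let idx := PySem.Int.mod (p - (j : Int)) (m : Int)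
            PySem.List.pySetD cs idx (PySem.List.pyGetD cs idx 0 + 1)) cs)
        (List.replicate m 0)).getD s 0 = (pvCnt u1 u2 s : Int) := by
    intro s hs
    rw [← PySem.List.pyGetD_natCast _ s (0 : Int), (hcounts s hs).2,
      PySem.List.pyGetD_natCast]
    have hrep : (List.replicate m (0 : Int)).getD s 0 = 0 := by
      simp [List.getD, hs]
    rw [hrep, zero_add]
    have hmap : (List.range m).map (fun (j : Nat) =>
        ((positions.getD (PySem.List.pyGetD u1 (j : Int) ' ') []).countP
          (fun p => decide (PySem.Int.mod (p - (j : Int)) (m : Int) = (s : Int))) : Int))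
      = (List.range m).map (fun (j : Nat) =>
          if (fun (j : Nat) => decide (u1[j]? = u2[(s + j) % u2.length]?)) j = true
          then (1 : Int) else 0) := by
      apply List.map_congr_left
      intro j hj
      have hjm : j < m := List.mem_range.1 hj
      have hj1 : j < u1.length := lt_of_lt_of_le hjm hpre
      have p0lt : (s + j) % m < m := Nat.mod_lt _ hm
      rw [hpos (PySem.List.pyGetD u1 (j : Int) ' '), List.countP_map, List.countP_filter]
      rw [List.countP_congr (q := fun p =>
          decide (p = (s + j) % m) && (u2.getD p ' ' == PySem.List.pyGetD u1 (j : Int) ' '))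
        (by
          intro p hp
          have hpm : p < m := List.mem_range.1 hp
          simp [mod_rot_iff p j s m hpm hs])]
      rw [countP_single _ List.nodup_range ((s + j) % m) (List.mem_range.2 p0lt)]
      have hcond : (u2.getD ((s + j) % m) ' ' == PySem.List.pyGetD u1 (j : Int) ' ')
          = decide (u1[j]? = u2[(s + j) % u2.length]?) := by
        have hlm : (s + j) % u2.length = (s + j) % m := by rw [← hm']
        have p0lt' : (s + j) % m < u2.length := by omega
        apply Bool.eq_iff_iff.mpr
        rw [PySem.List.pyGetD_natCast, hlm, List.getElem?_eq_getElem hj1,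
          List.getElem?_eq_getElem p0lt', List.getD_eq_getElem _ _ p0lt',
          List.getD_eq_getElem _ _ hj1]
        simp only [beq_iff_eq, decide_eq_true_eq, Option.some.injEq]
        exact eq_comm
      rw [hcond]
      split_ifs <;> simp
    rw [hmap, PySem.List.sum_map_ite_one_zero]
    simp only [pvCnt]
    rw [hm']
  rw [any_eq_range_any _ (0 : Int), (hcounts 0 hm).1]
  rw [Bool.eq_iff_iff, List.any_eq_true, List.any_eq_true]
  constructor
  · rintro ⟨s, hsmem, hdec⟩
    exact ⟨s, hsmem, by rwa [hval s (List.mem_range.1 hsmem)] at hdec⟩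
  · rintro ⟨s, hsmem, hdec⟩
    exact ⟨s, hsmem, by rwa [hval s (List.mem_range.1 hsmem)]⟩

-- ===== VERDICT (by name: the statement is the Claim_ definition above) =====
theorem units_eq_spec : Claim_equal_units_eq := by
  intro unit1 unit2 hdom hpre
  unfold Spec_units_eq
  rcases hpre with h0 | hmle
  · rw [units_eq_as_any]
    simp [h0, units_eq_alt]
  · by_cases hn : unit1.toList.length = 0
    · rw [units_eq_as_any]
      simp [hn, units_eq_alt]
    · rw [units_eq_as_any, units_eq_alt_as_any unit1 unit2 hmle hn]
      by_cases hm0 : unit2.toList.length = 0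
      · simp [pvCnt, hm0]
      · rw [Bool.eq_iff_iff, List.any_eq_true, List.any_eq_true]
        constructor
        · rintro ⟨i, hi, hdec⟩
          refine ⟨i % unit2.toList.length,
            List.mem_range.2 (Nat.mod_lt _ (Nat.pos_of_ne_zero hm0)), ?_⟩
          rwa [← pvCnt_mod]
        · rintro ⟨s, hsmem, hdec⟩
          exact ⟨s, List.mem_range.2 (lt_of_lt_of_le (List.mem_range.1 hsmem) hmle), hdec⟩
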